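-- pv_equiv track=rewrite | github.com/manttoni/algorithms | putkaposti/lukujenvihaaja/kakpot.py | tv
-- ===== SOURCE A (Python) =====
-- def kakpot(kp):
--     n = 0
--     k = 0
--     while k < kp:
--         n = n * 2 + 2 ** k
--         k += 1
--     return n
--
-- def tv(n):
--     v = 0
--     lasketut = 0
--     kp = 0
--     while lasketut + 2 ** kp <= n:
--         lasketut += 2 ** kp
--         kp += 1
--     v += kakpot(kp)
--     jaljella = n - lasketut
--
--     i = 0
--     while jaljella != 0:
--         kp = 0
--         while 2 ** kp <= jaljella:
--             kp += 1
--         v += kakpot(kp) - kakpot(kp - 1) + i * (2 ** kp - 2 ** (kp - 1))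
--         lasketut += 2 ** (kp - 1)
--         jaljella = n - lasketut
--         i += 1
--
--     return v
-- ===== SOURCE B (Python) =====
-- def tv(n):
--     # total number of set bits among 0..n, by top-down binary recursion:
--     # g(m) = (sum of popcounts of 0..m-1, popcount of m)
--     def g(m):
--         if m <= 0:
--             return (0, 0)
--         s, o = g(m // 2)
--         h = m // 2
--         if m % 2 == 0:
--             return (2 * s + h, o)
--         return (2 * s + h + o, o + 1)
--     return g(n + 1)[0]
-- ===== Notes on version B (the rewrite author's own statement) =====
-- stated objective: simpler
-- what changed: A greedily peels power-of-two blocks off n with a helper loop kakpot and three nested while loops; B recognises the value as the total popcount of 0..n and computes it by a single top-down binary recursion g(m) = (sum of popcounts below m, popcount of m) on m//2.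
import Mathlib
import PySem

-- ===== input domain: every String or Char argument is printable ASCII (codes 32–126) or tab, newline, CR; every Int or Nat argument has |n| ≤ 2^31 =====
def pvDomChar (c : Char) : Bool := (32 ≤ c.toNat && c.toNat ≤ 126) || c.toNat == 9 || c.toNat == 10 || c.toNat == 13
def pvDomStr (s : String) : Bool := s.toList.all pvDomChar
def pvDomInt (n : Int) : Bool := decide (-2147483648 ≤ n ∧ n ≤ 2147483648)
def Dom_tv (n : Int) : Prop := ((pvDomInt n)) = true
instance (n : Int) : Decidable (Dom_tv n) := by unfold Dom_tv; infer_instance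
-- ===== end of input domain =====

-- B replaces A's greedy power-of-two block peeling (three nested while loops plus the
-- helper kakpot) by a single top-down binary recursion on (n+1)//2; objective: simpler.


-- ===== PORT A =====
-- helper kakpot: n = 0; k = 0; while k < kp: n = n*2 + 2**k; k += 1; return n
def kakpotGo (kp n k : Int) : Int :=
  if h : k < kp then kakpotGo kp (n * 2 + 2 ^ k.toNat) (k + 1) else n
termination_by (kp - k).toNat
decreasing_by omega

def kakpot (kp : Int) : Int := kakpotGo kp 0 0

-- first loop: while lasketut + 2**kp <= n: lasketut += 2**kp; kp += 1  (returns (lasketut, kp))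
def tvLoop1 (n lasketut kp : Int) : Int × Int :=
  if h : lasketut + 2 ^ kp.toNat ≤ n then tvLoop1 n (lasketut + 2 ^ kp.toNat) (kp + 1)
  else (lasketut, kp)
termination_by (n - lasketut).toNat
decreasing_by
  have h1 : (1 : Int) ≤ 2 ^ kp.toNat := one_le_pow₀ (by norm_num)
  omega

-- inner loop: kp = 0; while 2**kp <= jaljella: kp += 1
def tvInner (jal kp : Int) : Int :=
  if h : 2 ^ kp.toNat ≤ jal then tvInner jal (kp + 1) else kp
termination_by (jal - kp).toNat
decreasing_by
  have h1 : (kp.toNat : Int) < 2 ^ kp.toNat := by exact_mod_cast Nat.lt_two_pow_self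
  omega

-- outer loop: Python's `while jaljella != 0` never terminates for jaljella < 0 (only
-- reachable outside Pre_tv), so the guard is written 0 < jaljella to make the port total.
def tvLoop2 (n v lasketut i : Int) : Int :=
  if h : 0 < n - lasketut then
    let jal := n - lasketut
    let kp := tvInner jal 0
    tvLoop2 n (v + kakpot kp - kakpot (kp - 1) + i * (2 ^ kp.toNat - 2 ^ (kp - 1).toNat))
      (lasketut + 2 ^ (kp - 1).toNat) (i + 1)
  else v
termination_by (n - lasketut).toNat
decreasing_by
  have h1 : (1 : Int) ≤ 2 ^ (tvInner (n - lasketut) 0 - 1).toNat := one_le_pow₀ (by norm_num)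
  omega

def tv (n : Int) : Int :=
  let p := tvLoop1 n 0 0
  let v := 0 + kakpot p.2
  tvLoop2 n v p.1 0

-- ===== PORT B =====
-- g(m) = (sum of popcounts of 0..m-1, popcount of m), recursing on m//2
def tvAltG (m : Int) : Int × Int :=
  if h : m ≤ 0 then (0, 0)
  else
    let p := tvAltG (PySem.Int.floordiv m 2)
    let hh := PySem.Int.floordiv m 2
    if PySem.Int.mod m 2 = 0 then (2 * p.1 + hh, p.2)
    else (2 * p.1 + hh + p.2, p.2 + 1)
termination_by m.toNat
decreasing_by
  have h1 : PySem.Int.floordiv m 2 = m / 2 := PySem.Int.floordiv_eq_ediv_of_pos (by norm_num)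
  omega

def tv_alt (n : Int) : Int := (tvAltG (n + 1)).1

-- ===== PRECONDITION & SPEC =====
-- Pre_tv: the Python A's outer loop never terminates for n < 0 (jaljella stays negative),
-- so exactly the nonnegative inputs are admitted.
def Pre_tv (n : Int) : Prop := 0 ≤ n
instance (n : Int) : Decidable (Pre_tv n) := by unfold Pre_tv; infer_instance
def pvWitness_tv : Int := (5)

def Spec_tv (n : Int) (out : Int) : Prop := out = tv_alt n
instance (n : Int) (out : Int) : Decidable (Spec_tv n out) := by unfold Spec_tv; infer_instance

-- ===== CLAIM (what is proved, stated in full; the proofs are below) =====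
def Claim_equal_tv : Prop := ∀ (n : Int), Dom_tv n → Pre_tv n → Spec_tv n (tv n)

-- ===== LEMMAS AND PROOFS =====

-- popcount on Nat and the running total SN m = Σ_{j<m} popcount j
def onesN (m : Nat) : Nat :=
  if m = 0 then 0 else m % 2 + onesN (m / 2)
termination_by m
decreasing_by exact Nat.div_lt_self (by omega) (by omega)

def SN (m : Nat) : Nat := ∑ j ∈ Finset.range m, onesN j

theorem onesN_zero : onesN 0 = 0 := by unfold onesN; simp

theorem onesN_two_mul (k : Nat) : onesN (2 * k) = onesN k := by
  rcases Nat.eq_zero_or_pos k with h | h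
  · simp [h]
  · have h1 : 2 * k % 2 = 0 := by omega
    have h2 : 2 * k / 2 = k := by omega
    rw [onesN, if_neg (by omega), h1, h2, Nat.zero_add]

theorem onesN_two_mul_add_one (k : Nat) : onesN (2 * k + 1) = onesN k + 1 := by
  have h1 : (2 * k + 1) % 2 = 1 := by omega
  have h2 : (2 * k + 1) / 2 = k := by omega
  rw [onesN, if_neg (by omega), h1, h2]
  omega

theorem onesN_two_pow (t : Nat) : onesN (2 ^ t) = 1 := by
  induction t with
  | zero => rw [onesN]; simp [onesN_zero]
  | succ t ih => rw [pow_succ, mul_comm, onesN_two_mul, ih]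

theorem SN_zero : SN 0 = 0 := by simp [SN]

theorem SN_succ (m : Nat) : SN (m + 1) = SN m + onesN m := by
  simp [SN, Finset.sum_range_succ]

theorem SN_two_mul (h : Nat) : SN (2 * h) = 2 * SN h + h := by
  induction h with
  | zero => simp [SN]
  | succ h ih =>
      have e : 2 * (h + 1) = (2 * h + 1) + 1 := by ring
      rw [e, SN_succ, SN_succ, ih, onesN_two_mul, onesN_two_mul_add_one, SN_succ]
      ring

theorem SN_two_pow_succ (k : Nat) : SN (2 ^ (k + 1)) = 2 * SN (2 ^ k) + 2 ^ k := by
  rw [pow_succ, mul_comm, SN_two_mul]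

-- popcount additivity on disjoint bit ranges
theorem onesN_add : ∀ (k a r : Nat), 2 ^ k ∣ a → r < 2 ^ k →
    onesN (a + r) = onesN a + onesN r := by
  intro k
  induction k with
  | zero =>
      intro a r _ hr
      interval_cases r
      simp [onesN_zero]
  | succ k ih =>
      intro a r ha hr
      obtain ⟨q, hq⟩ := ha
      have ea : a = 2 * (2 ^ k * q) := by rw [hq, pow_succ]; ring
      have hr2 : r / 2 < 2 ^ k := by
        have h2 : r < 2 ^ k * 2 := by rw [← pow_succ]; exact hr
        omega
      have hIH := ih (2 ^ k * q) (r / 2) (Dvd.intro q rfl) hr2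
      have hrsplit : r = 2 * (r / 2) ∨ r = 2 * (r / 2) + 1 := by omega
      rcases hrsplit with he | ho
      · have e1 : a + r = 2 * (2 ^ k * q + r / 2) := by omega
        rw [e1, onesN_two_mul, hIH, ea, onesN_two_mul]
        conv_rhs => rw [he, onesN_two_mul]
      · have e1 : a + r = 2 * (2 ^ k * q + r / 2) + 1 := by omega
        rw [e1, onesN_two_mul_add_one, hIH, ea, onesN_two_mul]
        conv_rhs => rw [ho, onesN_two_mul_add_one]
        ring

theorem SN_block (k a : Nat) (ha : 2 ^ k ∣ a) :
    SN (a + 2 ^ k) = SN a + 2 ^ k * onesN a + SN (2 ^ k) := by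
  have main : ∀ r : Nat, r ≤ 2 ^ k → SN (a + r) = SN a + r * onesN a + SN r := by
    intro r
    induction r with
    | zero => simp [SN_zero]
    | succ r ih =>
        intro hle
        have hr : r < 2 ^ k := by omega
        rw [← Nat.add_assoc, SN_succ, ih (by omega), SN_succ, onesN_add k a r ha hr]
        ring
  exact main _ le_rfl

-- ---- A-side characterisations ----

theorem kakpotGo_spec : ∀ (m : Nat) (kp k n : Int), (kp - k).toNat = m → 0 ≤ k → k ≤ kp →
    n = (SN (2 ^ k.toNat) : Int) → kakpotGo kp n k = (SN (2 ^ kp.toNat) : Int) := by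
  intro m
  induction m with
  | zero =>
      intro kp k n hm hk hkk hn
      have hkkp : k = kp := by omega
      rw [kakpotGo, dif_neg (by omega), hn, hkkp]
  | succ m ih =>
      intro kp k n hm hk hkk hn
      have hlt : k < kp := by omega
      rw [kakpotGo, dif_pos hlt]
      apply ih _ _ _ (by omega) (by omega) (by omega)
      have ht : (k + 1).toNat = k.toNat + 1 := by omega
      rw [ht, SN_two_pow_succ, hn]
      push_cast
      ring

theorem kakpot_spec (kp : Int) (h : 0 ≤ kp) : kakpot kp = (SN (2 ^ kp.toNat) : Int) := by
  apply kakpotGo_spec (kp - 0).toNat kp 0 _ rfl le_rfl h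
  have h1 : SN 1 = 0 := by
    rw [show (1 : Nat) = 0 + 1 from rfl, SN_succ, SN_zero, onesN_zero]
  norm_num [h1]

theorem tvLoop1_spec : ∀ (m : Nat) (n l kp : Int), (n - l).toNat = m → 0 ≤ kp →
    l = 2 ^ kp.toNat - 1 → l ≤ n →
    ∃ K : Nat, tvLoop1 n l kp = ((2 ^ K - 1 : Int), ((K : Int))) ∧
      (2 ^ K : Int) ≤ n + 1 ∧ n + 1 < 2 ^ (K + 1) := by
  intro m
  induction m using Nat.strong_induction_on with
  | _ m ih =>
      intro n l kp hm hkp hl hln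
      by_cases hgo : l + 2 ^ kp.toNat ≤ n
      · rw [tvLoop1, dif_pos hgo]
        have h1 : (1 : Int) ≤ 2 ^ kp.toNat := one_le_pow₀ (by norm_num)
        apply ih (n - (l + 2 ^ kp.toNat)).toNat (by omega) _ _ _ rfl (by omega) _ (by omega)
        have ht : (kp + 1).toNat = kp.toNat + 1 := by omega
        rw [ht, hl, pow_succ]; ring
      · rw [tvLoop1, dif_neg hgo]
        refine ⟨kp.toNat, ?_, by rw [hl] at hln; omega, ?_⟩
        · simp only [Prod.mk.injEq]
          exact ⟨by rw [hl], by omega⟩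
        · rw [hl] at hgo
          rw [pow_succ]
          omega

theorem tvInner_spec : ∀ (m : Nat) (jal k : Int), (jal - k).toNat = m → 1 ≤ k →
    ((2 ^ (k.toNat - 1) : Nat) : Int) ≤ jal →
    ∃ K : Nat, tvInner jal k = ((K : Int)) ∧ 1 ≤ K ∧
      ((2 ^ (K - 1) : Nat) : Int) ≤ jal ∧ jal < ((2 ^ K : Nat) : Int) := by
  intro m
  induction m using Nat.strong_induction_on with
  | _ m ih =>
      intro jal k hm hk hlow
      by_cases hgo : (2 ^ k.toNat : Int) ≤ jal
      · rw [tvInner, dif_pos hgo]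
        have hkk : (k.toNat : Int) < 2 ^ k.toNat := by exact_mod_cast Nat.lt_two_pow_self
        apply ih (jal - (k + 1)).toNat (by omega) _ _ rfl (by omega)
        have ht : (k + 1).toNat - 1 = k.toNat := by omega
        rw [ht]; push_cast; exact hgo
      · rw [tvInner, dif_neg hgo]
        refine ⟨k.toNat, by omega, by omega, hlow, by push_cast; omega⟩

theorem tvLoop2_spec : ∀ (m : Nat) (n v l i : Int), (n - l).toNat = m →
    0 ≤ l → l ≤ n → 0 ≤ i →
    v = (SN (l + 1).toNat : Int) →
    (onesN (l + 1).toNat : Int) = i + 1 →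
    (∃ t : Nat, 2 ^ t ∣ (l + 1).toNat ∧ n - l < ((2 ^ t : Nat) : Int)) →
    tvLoop2 n v l i = (SN (n + 1).toNat : Int) := by
  intro m
  induction m using Nat.strong_induction_on with
  | _ m ih =>
      intro n v l i hm hl0 hln hi hv hones hex
      obtain ⟨t, hdvd, hjt⟩ := hex
      by_cases hgo : 0 < n - l
      · rw [tvLoop2, dif_pos hgo]
        obtain ⟨K, hK, hK1, hKlow, hKhi⟩ :=
          tvInner_spec (n - l - 1).toNat (n - l) 1 (by omega) le_rfl (by norm_num; omega)
        have hstep : tvInner (n - l) 0 = tvInner (n - l) 1 := by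
          rw [tvInner, dif_pos (by norm_num; omega)]
          norm_num
        simp only [hstep, hK]
        -- cast bookkeeping
        have eK : ((K : Int)).toNat = K := by omega
        have eK1 : ((K : Int) - 1).toNat = K - 1 := by omega
        have hcast : (((2 : Nat) ^ (K - 1) : Nat) : Int) = (2 : Int) ^ (K - 1) := by push_cast; ring
        have hcastK : (((2 : Nat) ^ K : Nat) : Int) = (2 : Int) ^ K := by push_cast; ring
        have hpow1 : (1 : Int) ≤ (2 : Int) ^ (K - 1) := one_le_pow₀ (by norm_num)
        have hKsucc : (2 : Int) ^ K = 2 * (2 : Int) ^ (K - 1) := by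
          rw [← pow_succ']; congr 1; omega
        have hKsuccN : (2 : Nat) ^ K = 2 * (2 : Nat) ^ (K - 1) := by
          rw [← pow_succ']; congr 1; omega
        -- the t-block divides A := (l+1).toNat and exceeds 2^(K-1)
        have hKt : K ≤ t := by
          by_contra hc
          have hle : (2 : Nat) ^ t ≤ 2 ^ (K - 1) := Nat.pow_le_pow_right (by norm_num) (by omega)
          have : ((2 ^ t : Nat) : Int) ≤ ((2 ^ (K - 1) : Nat) : Int) := by exact_mod_cast hle
          omega
        have hdvd' : 2 ^ (K - 1) ∣ (l + 1).toNat :=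
          dvd_trans (pow_dvd_pow 2 (by omega)) hdvd
        -- abbreviations
        have hAcast : (((l + 1).toNat : Nat) : Int) = l + 1 := by omega
        have hAnew : (l + (2 : Int) ^ (K - 1) + 1).toNat = (l + 1).toNat + 2 ^ (K - 1) := by
          omega
        have hSN : SN (2 ^ K) = 2 * SN (2 ^ (K - 1)) + 2 ^ (K - 1) := by
          have h := SN_two_pow_succ (K - 1)
          rwa [show K - 1 + 1 = K from by omega] at h
        have hlt' : (2 : Nat) ^ (K - 1) < 2 ^ t := by omega
        apply ih (n - (l + 2 ^ ((K : Int) - 1).toNat)).toNat _ _ _ _ _ rfl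
        · -- 0 ≤ new l
          rw [eK1]; omega
        · -- new l ≤ n
          rw [eK1]; omega
        · omega
        · -- new v
          rw [kakpot_spec (K : Int) (by omega), kakpot_spec ((K : Int) - 1) (by omega),
            eK, eK1, hv, hAnew, SN_block (K - 1) (l + 1).toNat hdvd', hSN, hKsucc]
          push_cast
          linear_combination (-(2 : Int) ^ (K - 1)) * hones
        · -- new ones
          rw [eK1, hAnew, onesN_add t _ _ hdvd hlt', onesN_two_pow]
          push_cast
          omega
        · -- new block certificate
          refine ⟨K - 1, ?_, ?_⟩
          · rw [eK1, hAnew]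
            exact dvd_add hdvd' dvd_rfl
          · rw [eK1]; omega
        · -- measure decreases
          rw [eK1]; omega
      · rw [tvLoop2, dif_neg hgo]
        have hln' : l = n := by omega
        rw [hv, hln']

-- ---- B-side characterisation ----

theorem tvAltG_spec : ∀ (m : Nat) (x : Int), x.toNat = m → 0 ≤ x →
    tvAltG x = ((SN x.toNat : Int), (onesN x.toNat : Int)) := by
  intro m
  induction m using Nat.strong_induction_on with
  | _ m ih =>
      intro x hm hx
      by_cases h0 : x ≤ 0
      · have hx0 : x = 0 := by omega
        rw [tvAltG, dif_pos h0, hx0]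
        norm_num [SN_zero, onesN_zero]
      · rw [tvAltG, dif_neg h0]
        have hfd : PySem.Int.floordiv x 2 = ((m / 2 : Nat) : Int) := by
          rw [show x = ((m : Nat) : Int) from by omega]
          exact_mod_cast PySem.Int.floordiv_natCast m 2
        have hmd : PySem.Int.mod x 2 = ((m % 2 : Nat) : Int) := by
          rw [show x = ((m : Nat) : Int) from by omega]
          exact_mod_cast PySem.Int.mod_natCast m 2
        have hIH := ih (m / 2) (by omega) ((m / 2 : Nat) : Int) (by omega) (by positivity)
        rw [show (((m / 2 : Nat) : Int)).toNat = m / 2 from by omega] at hIH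
        simp only [hfd, hmd, hIH, hm]
        by_cases hpar : m % 2 = 0
        · rw [if_pos (by exact_mod_cast hpar)]
          have e : m = 2 * (m / 2) := by omega
          simp only [Prod.mk.injEq]
          refine ⟨?_, ?_⟩
          · conv_rhs => rw [e]
            rw [SN_two_mul]; push_cast; ring
          · conv_rhs => rw [e]
            rw [onesN_two_mul]
        · rw [if_neg (by exact_mod_cast hpar)]
          have e : m = 2 * (m / 2) + 1 := by omega
          simp only [Prod.mk.injEq]
          refine ⟨?_, ?_⟩
          · conv_rhs => rw [e]
            rw [SN_succ, SN_two_mul, onesN_two_mul]; push_cast; ring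
          · conv_rhs => rw [e]
            rw [onesN_two_mul_add_one]; push_cast; ring

-- ===== VERDICT (by name: the statement is the Claim_ definition above) =====
theorem tv_spec : Claim_equal_tv := by
  unfold Claim_equal_tv Spec_tv Pre_tv
  intro n _ hpre
  obtain ⟨K0, hL1, hlo, hhi⟩ :=
    tvLoop1_spec (n - 0).toNat n 0 0 rfl le_rfl (by norm_num) hpre
  have hp1 : (1 : Int) ≤ (2 : Int) ^ K0 := one_le_pow₀ (by norm_num)
  have hcast : (((2 : Nat) ^ K0 : Nat) : Int) = (2 : Int) ^ K0 := by push_cast; ring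
  have eK0 : ((K0 : Int)).toNat = K0 := by omega
  have hA : ((2 : Int) ^ K0 - 1 + 1).toNat = 2 ^ K0 := by omega
  have htv : tv n = (SN (n + 1).toNat : Int) := by
    unfold tv
    rw [hL1]
    apply tvLoop2_spec (n - ((2 : Int) ^ K0 - 1)).toNat _ _ _ _ rfl (by omega) (by omega)
      (by norm_num)
    · rw [kakpot_spec _ (by omega), eK0, hA]
      omega
    · rw [hA, onesN_two_pow]; norm_num
    · refine ⟨K0, ?_, ?_⟩
      · rw [hA]
      · rw [hcast]
        have : (2 : Int) ^ (K0 + 1) = 2 * 2 ^ K0 := by rw [pow_succ]; ring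
        omega
  have halt : tv_alt n = (SN (n + 1).toNat : Int) := by
    unfold tv_alt
    rw [tvAltG_spec (n + 1).toNat (n + 1) rfl (by omega)]
  rw [htv, halt]
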